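-- pv_equiv track=rewrite | github.com/ScarletRedJoker/HomeLabHub | services/dashboard/services/package_service.py | add_to_cargo_toml
-- ===== SOURCE A (Python) =====
-- from typing import Optional, Dict, Any, List, Tuple
--
-- def add_to_cargo_toml(content: str, package_name: str, version: Optional[str]) -> str:
--     """Add package to Cargo.toml content"""
--     lines = content.split('\n')
--     in_deps = False
--     deps_end = -1
--
--     for i, line in enumerate(lines):
--         if line.strip().startswith('[dependencies]'):
--             in_deps = True
--             continue
--         elif line.strip().startswith('[') and in_deps:
--             deps_end = i
--             break
--         elif in_deps and line.strip().startswith(package_name):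
--             ver = version if version and version != 'latest' else '*'
--             lines[i] = f'{package_name} = "{ver}"'
--             return '\n'.join(lines)
--
--     ver = version if version and version != 'latest' else '*'
--     new_line = f'{package_name} = "{ver}"'
--
--     if deps_end > 0:
--         lines.insert(deps_end, new_line)
--     elif in_deps:
--         lines.append(new_line)
--     else:
--         lines.append('\n[dependencies]')
--         lines.append(new_line)
--
--     return '\n'.join(lines)
-- ===== SOURCE B (Python) =====
-- from typing import Optional
--
-- def _find_header(lines):
--     for i, l in enumerate(lines):
--         if l.strip().startswith('[dependencies]'):
--             return i + 1
--     return None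
--
-- def _find_end(lines, start):
--     for j in range(start, len(lines)):
--         s = lines[j].strip()
--         if s.startswith('[') and not s.startswith('[dependencies]'):
--             return j
--     return None
--
-- def _find_match(lines, start, stop, package_name):
--     for k in range(start, stop):
--         s = lines[k].strip()
--         if not s.startswith('[dependencies]') and s.startswith(package_name):
--             return k
--     return None
--
-- def add_to_cargo_toml(content: str, package_name: str, version: Optional[str]) -> str:
--     ver = version if version and version != 'latest' else '*'
--     entry = f'{package_name} = "{ver}"'
--     lines = content.split('\n')
--     start = _find_header(lines)
--     if start is None:
--         return '\n'.join(lines + ['\n[dependencies]', entry])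
--     end = _find_end(lines, start)
--     stop = len(lines) if end is None else end
--     k = _find_match(lines, start, stop, package_name)
--     if k is not None:
--         return '\n'.join(lines[:k] + [entry] + lines[k + 1:])
--     if end is None:
--         return '\n'.join(lines + [entry])
--     return '\n'.join(lines[:end] + [entry] + lines[end:])
-- ===== Notes on version B (the rewrite author's own statement) =====
-- stated objective: alternative
-- what changed: Replaces A's single stateful scan with in_deps flag, deps_end sentinel and break/continue by three separate index searches (section header, section end, matching package line) followed by pure list slicing.
import Mathlib
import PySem

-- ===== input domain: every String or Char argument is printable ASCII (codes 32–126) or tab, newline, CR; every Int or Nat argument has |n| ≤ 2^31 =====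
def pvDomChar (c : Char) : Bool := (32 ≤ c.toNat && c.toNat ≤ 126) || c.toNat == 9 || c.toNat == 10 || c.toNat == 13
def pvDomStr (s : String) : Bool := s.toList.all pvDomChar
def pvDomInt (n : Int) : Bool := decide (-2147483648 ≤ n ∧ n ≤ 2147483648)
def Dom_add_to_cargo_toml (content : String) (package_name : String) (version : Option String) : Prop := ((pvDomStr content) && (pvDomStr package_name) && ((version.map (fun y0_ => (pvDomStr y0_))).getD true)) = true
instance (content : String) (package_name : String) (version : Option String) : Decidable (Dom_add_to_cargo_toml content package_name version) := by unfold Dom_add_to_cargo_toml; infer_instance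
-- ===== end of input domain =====

-- B replaces A's single stateful scan (in_deps flag, deps_end, break/continue) by three
-- separate index searches (section header, section end, matching line) and pure slicing;
-- objective: alternative decomposition, same cost.

-- ===== PORT A =====
-- A's code after the loop: build new_line and place it according to deps_end / in_deps
def pvAfterA (lines : List String) (package_name ver : String) (in_deps : Bool) (deps_end : Int) : String :=
  let new_line := package_name ++ " = \"" ++ ver ++ "\""
  if deps_end > 0 then PySem.Str.join "\n" (PySem.List.insert lines deps_end new_line)
  else if in_deps then PySem.Str.join "\n" (lines ++ [new_line])
  else PySem.Str.join "\n" (lines ++ ["\n[dependencies]", new_line])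

-- A's for-loop over `enumerate(lines)`: suf is the remaining lines, i the current index
def pvLoopA (lines : List String) (package_name ver : String) :
    List String → Nat → Bool → Int → String
  | [], _, in_deps, deps_end => pvAfterA lines package_name ver in_deps deps_end
  | l :: rest, i, in_deps, deps_end =>
    if PySem.Str.startswith (PySem.Str.strip l) "[dependencies]" then
      pvLoopA lines package_name ver rest (i + 1) true deps_end
    else if PySem.Str.startswith (PySem.Str.strip l) "[" && in_deps then
      pvAfterA lines package_name ver in_deps (i : Int)          -- break with deps_end = i
    else if in_deps && PySem.Str.startswith (PySem.Str.strip l) package_name then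
      PySem.Str.join "\n" (lines.set i (package_name ++ " = \"" ++ ver ++ "\""))
    else
      pvLoopA lines package_name ver rest (i + 1) in_deps deps_end

def add_to_cargo_toml (content : String) (package_name : String) (version : Option String) : String :=
  let lines := (PySem.Str.split? content "\n").getD []
  let ver := match version with
    | none => "*"
    | some v => if v ≠ "" ∧ v ≠ "latest" then v else "*"
  pvLoopA lines package_name ver lines 0 false (-1)

-- ===== PORT B =====
-- index just after the first '[dependencies]' header line, if any
def pvFindHeader : List String → Option Nat
  | [] => none
  | l :: rest =>
    if PySem.Str.startswith (PySem.Str.strip l) "[dependencies]" then some 1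
    else (pvFindHeader rest).map (· + 1)

-- first line opening a different section
def pvFindEnd : List String → Option Nat
  | [] => none
  | l :: rest =>
    if PySem.Str.startswith (PySem.Str.strip l) "[" &&
       !PySem.Str.startswith (PySem.Str.strip l) "[dependencies]" then some 0
    else (pvFindEnd rest).map (· + 1)

-- first non-header line starting with the package name
def pvFindMatch (package_name : String) : List String → Option Nat
  | [] => none
  | l :: rest =>
    if !PySem.Str.startswith (PySem.Str.strip l) "[dependencies]" &&
       PySem.Str.startswith (PySem.Str.strip l) package_name then some 0
    else (pvFindMatch package_name rest).map (· + 1)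

def add_to_cargo_toml_alt (content : String) (package_name : String) (version : Option String) : String :=
  let ver := match version with
    | none => "*"
    | some v => if v ≠ "" ∧ v ≠ "latest" then v else "*"
  let entry := package_name ++ " = \"" ++ ver ++ "\""
  let lines := (PySem.Str.split? content "\n").getD []
  match pvFindHeader lines with
  | none => PySem.Str.join "\n" (lines ++ ["\n[dependencies]", entry])
  | some start =>
    let tail := lines.drop start
    match pvFindEnd tail with
    | none =>
      match pvFindMatch package_name tail with
      | some k => PySem.Str.join "\n" (lines.take (start + k) ++ [entry] ++ lines.drop (start + k + 1))
      | none => PySem.Str.join "\n" (lines ++ [entry])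
    | some e =>
      match pvFindMatch package_name (tail.take e) with
      | some k => PySem.Str.join "\n" (lines.take (start + k) ++ [entry] ++ lines.drop (start + k + 1))
      | none => PySem.Str.join "\n" (lines.take (start + e) ++ [entry] ++ lines.drop (start + e))

-- ===== PRECONDITION & SPEC =====
def Spec_add_to_cargo_toml (content : String) (package_name : String) (version : Option String) (out : String) : Prop := out = add_to_cargo_toml_alt content package_name version
instance (content : String) (package_name : String) (version : Option String) (out : String) : Decidable (Spec_add_to_cargo_toml content package_name version out) := by unfold Spec_add_to_cargo_toml; infer_instance

-- ===== CLAIM (what is proved, stated in full; the proofs are below) =====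
def Claim_equal_add_to_cargo_toml : Prop := ∀ (content : String) (package_name : String) (version : Option String), Dom_add_to_cargo_toml content package_name version → Spec_add_to_cargo_toml content package_name version (add_to_cargo_toml content package_name version)

-- ===== LEMMAS AND PROOFS =====

-- B's phase-2 value (dependencies section located; i = absolute index of suf's head)
def pvPhase2B (lines : List String) (package_name entry : String) (suf : List String) (i : Nat) : String :=
  match pvFindEnd suf with
  | none =>
    match pvFindMatch package_name suf with
    | some k => PySem.Str.join "\n" (lines.take (i + k) ++ [entry] ++ lines.drop (i + k + 1))
    | none => PySem.Str.join "\n" (lines ++ [entry])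
  | some e =>
    match pvFindMatch package_name (suf.take e) with
    | some k => PySem.Str.join "\n" (lines.take (i + k) ++ [entry] ++ lines.drop (i + k + 1))
    | none => PySem.Str.join "\n" (lines.take (i + e) ++ [entry] ++ lines.drop (i + e))

theorem pvFindHeader_pos (xs : List String) (s : Nat) (h : pvFindHeader xs = some s) : 1 ≤ s := by
  induction xs generalizing s with
  | nil => simp [pvFindHeader] at h
  | cons l rest ih =>
    unfold pvFindHeader at h
    split at h
    · simp at h; omega
    · cases hr : pvFindHeader rest with
      | none => rw [hr] at h; simp at h
      | some t => rw [hr] at h; simp at h; omega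

theorem pvLoopA_phase2 (lines : List String) (package_name ver : String)
    (suf : List String) (i : Nat) (hi : 1 ≤ i) (hdrop : lines.drop i = suf) :
    pvLoopA lines package_name ver suf i true (-1) =
      pvPhase2B lines package_name (package_name ++ " = \"" ++ ver ++ "\"") suf i := by
  induction suf generalizing i with
  | nil =>
    simp [pvLoopA, pvPhase2B, pvFindEnd, pvFindMatch, pvAfterA]
  | cons l rest ih =>
    have hlen : i < lines.length := by
      apply List.length_lt_of_drop_ne_nil; rw [hdrop]; simp
    have hrest : lines.drop (i + 1) = rest := by
      rw [← List.tail_drop, hdrop]; rfl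
    by_cases hhd : PySem.Str.startswith (PySem.Str.strip l) "[dependencies]" = true
    · -- nested '[dependencies]' header: both sides skip the line
      simp only [pvLoopA, pvPhase2B, pvFindEnd, pvFindMatch, hhd, Bool.not_true, Bool.and_false,
        Bool.false_and, Bool.false_eq_true, if_true, if_false]
      rw [ih (i + 1) (by omega) hrest]
      simp only [pvPhase2B]
      cases pvFindEnd rest with
      | none =>
        simp only [Option.map_none]
        cases pvFindMatch package_name rest with
        | none => rfl
        | some k => simp [Nat.add_comm, Nat.add_left_comm]
      | some e =>
        simp only [Option.map_some, List.take_succ_cons, pvFindMatch, hhd, Bool.not_true,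
          Bool.false_and, Bool.false_eq_true, if_false]
        cases pvFindMatch package_name (rest.take e) with
        | none => simp [Nat.add_comm, Nat.add_left_comm]
        | some k => simp [Nat.add_comm, Nat.add_left_comm]
    · rw [Bool.not_eq_true] at hhd
      by_cases hbr : PySem.Str.startswith (PySem.Str.strip l) "[" = true
      · -- a different section starts: A breaks with deps_end = i, B inserts at the end index
        have hipos : (0 : Int) < (i : Int) := by exact_mod_cast hi
        simp only [pvLoopA, pvAfterA, pvPhase2B, pvFindEnd, pvFindMatch, hhd, hbr,
          Bool.not_false, Bool.true_and, Bool.and_true, Bool.false_eq_true, if_false, if_true,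
          if_pos hipos, List.take_zero]
        rw [PySem.List.insert_natCast lines i _ (le_of_lt hlen)]
        simp
      · rw [Bool.not_eq_true] at hbr
        by_cases hm : PySem.Str.startswith (PySem.Str.strip l) package_name = true
        · -- matching package line: A overwrites lines[i], B splices at the found index
          simp only [pvLoopA, pvPhase2B, pvFindEnd, pvFindMatch, hhd, hbr, hm,
            Bool.not_false, Bool.and_true, Bool.false_eq_true, if_false, if_true]
          rw [List.set_eq_take_cons_drop _ hlen]
          cases pvFindEnd rest with
          | none => simp
          | some e =>
            simp only [Option.map_some, List.take_succ_cons, pvFindMatch, hhd, hm,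
              Bool.not_false, Bool.true_and]
            simp
        · rw [Bool.not_eq_true] at hm
          -- ordinary line: both sides skip it
          simp only [pvLoopA, pvPhase2B, pvFindEnd, pvFindMatch, hhd, hbr, hm,
            Bool.not_false, Bool.and_true, Bool.and_false, Bool.false_eq_true, if_false]
          rw [ih (i + 1) (by omega) hrest]
          simp only [pvPhase2B]
          cases pvFindEnd rest with
          | none =>
            simp only [Option.map_none]
            cases pvFindMatch package_name rest with
            | none => rfl
            | some k => simp [Nat.add_comm, Nat.add_left_comm]
          | some e =>
            simp only [Option.map_some, List.take_succ_cons, pvFindMatch, hhd, hm,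
              Bool.not_false, Bool.true_and, Bool.false_eq_true, if_false]
            cases pvFindMatch package_name (rest.take e) with
            | none => simp [Nat.add_comm, Nat.add_left_comm]
            | some k => simp [Nat.add_comm, Nat.add_left_comm]

theorem pvLoopA_phase1 (lines : List String) (package_name ver : String)
    (suf : List String) (i : Nat) (hdrop : lines.drop i = suf) :
    pvLoopA lines package_name ver suf i false (-1) =
      match pvFindHeader suf with
      | none => PySem.Str.join "\n" (lines ++ ["\n[dependencies]",
                  package_name ++ " = \"" ++ ver ++ "\""])
      | some s => pvLoopA lines package_name ver (suf.drop s) (i + s) true (-1) := by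
  induction suf generalizing i with
  | nil => simp [pvLoopA, pvFindHeader, pvAfterA]
  | cons l rest ih =>
    have hrest : lines.drop (i + 1) = rest := by
      rw [← List.tail_drop, hdrop]; rfl
    by_cases hhd : PySem.Str.startswith (PySem.Str.strip l) "[dependencies]" = true
    · simp only [pvLoopA, pvFindHeader, hhd, if_true, List.drop_succ_cons,
        List.drop_zero]
    · rw [Bool.not_eq_true] at hhd
      simp only [pvLoopA, pvFindHeader, hhd, Bool.and_false, Bool.false_and,
        Bool.false_eq_true, if_false]
      rw [ih (i + 1) hrest]
      cases pvFindHeader rest with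
      | none => rfl
      | some t =>
        simp only [Option.map_some, List.drop_succ_cons]
        simp [Nat.add_comm, Nat.add_left_comm]

-- ===== VERDICT (by name: the statement is the Claim_ definition above) =====
theorem add_to_cargo_toml_spec : Claim_equal_add_to_cargo_toml := by
  intro content package_name version _
  unfold Spec_add_to_cargo_toml add_to_cargo_toml add_to_cargo_toml_alt
  set lines := (PySem.Str.split? content "\n").getD [] with hlines
  set ver := (match version with
    | none => "*"
    | some v => if v ≠ "" ∧ v ≠ "latest" then v else "*") with hver
  rw [pvLoopA_phase1 lines package_name ver lines 0 rfl]
  cases hh : pvFindHeader lines with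
  | none => simp only [hh]
  | some s =>
    simp only [hh, Nat.zero_add]
    rw [pvLoopA_phase2 lines package_name ver (lines.drop s) s
      (pvFindHeader_pos lines s hh) rfl]
    simp [pvPhase2B]
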